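-- pv_equiv track=rewrite | github.com/abhisheksingh75/DataStructure_Algorithm | Desktop/Acadmey/git_repos/DataStructures/Greedy/weight_Collections.py | solve
-- ===== SOURCE A (Python) =====
-- from collections import defaultdict
--
-- def DFS(graph, k, curr_total_weight, curr_ele, C, A, visited):
--
--     if k == A:
--         DFS.max_weight = max(DFS.max_weight, curr_total_weight)
--     else:
--         visited[curr_ele] = True
--         for next_ele, next_wei in graph[curr_ele]:
--             weight = abs(next_wei-C[curr_ele-1])
--             new_weight = (curr_total_weight+((weight*(A-k))%1000000007))%1000000007
--             DFS.max_weight = max(DFS.max_weight, new_weight)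
--             if not visited[next_ele]:
--                 DFS(graph, k+1, (curr_total_weight+weight)%1000000007,next_ele, C,A,visited)
--     return
--
-- def solve(A, B, C):
--
--     graph = defaultdict(list)
--     visited = [False]*(len(B)+1)
--     for i in range(1, len(B)):
--         graph[B[i]].append([i+1,C[i]])
--         graph[i+1].append([B[i], C[B[i]-1]])
--
--     DFS.max_weight = -1<<31
--     DFS(graph, 0, 0, 1, C, A,visited)
--
--     return DFS.max_weight
-- ===== SOURCE B (Python) =====
-- def solve(A, B, C):
--     MOD = 1000000007
--     n = len(B)
--     graph = {}
--     for i in range(1, n):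
--         graph.setdefault(B[i], []).append((i + 1, C[i]))
--         graph.setdefault(i + 1, []).append((B[i], C[B[i] - 1]))
--     visited = [False] * (n + 1)
--     max_weight = -1 << 31
--     # explicit-stack DFS: 'enter' frames do the call prologue, 'loop' frames
--     # resume the neighbor iteration; pre-order identical to the recursion
--     stack = [(True, 0, 0, 1, None)]
--     while stack:
--         is_enter, k, total, ele, pending = stack.pop()
--         if is_enter:
--             if k == A:
--                 max_weight = max(max_weight, total)
--             else:
--                 visited[ele] = True
--                 stack.append((False, k, total, ele, graph.get(ele, [])))
--         elif pending:
--             ne, nw = pending[0]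
--             stack.append((False, k, total, ele, pending[1:]))
--             w = abs(nw - C[ele - 1])
--             nwght = (total + (w * (A - k)) % MOD) % MOD
--             max_weight = max(max_weight, nwght)
--             if not visited[ne]:
--                 stack.append((True, k + 1, (total + w) % MOD, ne, None))
--     return max_weight
-- ===== Notes on version B (the rewrite author's own statement) =====
-- stated objective: alternative
-- what changed: The recursive DFS with function-attribute state is inlined into solve and replaced by an explicit stack of enter/resume frames threading max_weight locally, preserving the recursion's exact pre-order and entry-time visited marking.
-- outside the precondition, e.g. on solve(5, [7], []): A returns -2147483648, B returns -2147483648; on solve(1, [9, -5], [1, 2, 3, 4, 5, 6]): A returns -2147483648, B returns -2147483648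
import Mathlib
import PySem

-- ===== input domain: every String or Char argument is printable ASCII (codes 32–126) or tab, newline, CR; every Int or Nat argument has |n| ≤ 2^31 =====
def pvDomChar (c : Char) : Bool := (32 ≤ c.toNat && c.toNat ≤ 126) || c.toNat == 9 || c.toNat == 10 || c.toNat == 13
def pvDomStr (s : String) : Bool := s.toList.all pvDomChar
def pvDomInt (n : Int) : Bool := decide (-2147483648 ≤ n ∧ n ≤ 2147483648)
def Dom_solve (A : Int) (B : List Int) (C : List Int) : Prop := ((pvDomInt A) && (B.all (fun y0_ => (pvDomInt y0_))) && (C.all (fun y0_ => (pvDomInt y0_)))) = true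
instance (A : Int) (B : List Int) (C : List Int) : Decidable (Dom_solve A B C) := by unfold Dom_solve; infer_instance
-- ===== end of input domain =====

-- B replaces A's recursive DFS (with its function-attribute accumulator) by an explicit stack of
-- enter/resume frames inlined into solve, reproducing the same pre-order walk; equivalence is about
-- the return value (A mutates no argument observably: `visited` is a local list).

-- ===== PORT A =====

-- graph[B[i]].append(..) on a defaultdict(list) is exactly Dict.modify with default []
def pvBuildA (B C : List Int) : PySem.Dict Int (List (Int × Int)) :=
  (PySem.List.pyRange 1 (B.length : Int) 1).foldl
    (fun g i =>
      let bi := PySem.List.pyGetD B i 0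
      let g := g.modify bi [] (fun l => l ++ [((i + 1 : Int), PySem.List.pyGetD C i 0)])
      g.modify (i + 1) [] (fun l => l ++ [(bi, PySem.List.pyGetD C (bi - 1) 0)]))
    PySem.Dict.empty

-- one iteration of A's `for next_ele, next_wei in graph[curr_ele]` loop; `rec` is the recursive
-- call DFS(graph, k+1, …) at the smaller fuel; the Option state is none once a sub-call ran out of fuel
def pvStepA (C : List Int) (A k total ele : Int)
    (rec : Int → Int → Int → List Bool → Int → Option (List Bool × Int)) :
    Option (List Bool × Int) → Int × Int → Option (List Bool × Int) :=
  fun st p =>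
    st.bind (fun s =>
      let w := |p.2 - PySem.List.pyGetD C (ele - 1) 0|
      let nwt := PySem.Int.mod (total + PySem.Int.mod (w * (A - k)) 1000000007) 1000000007
      let mw2 := max s.2 nwt
      if PySem.List.pyGetD s.1 p.1 false = false then
        rec (k + 1) (PySem.Int.mod (total + w) 1000000007) p.1 s.1 mw2
      else some (s.1, mw2))

-- DFS(graph, k, curr_total_weight, curr_ele, C, A, visited), threading (visited, DFS.max_weight);
-- fuel-guarded (none = out of fuel; B.length + 2 is proved sufficient below)
def pvDfsA (gr : PySem.Dict Int (List (Int × Int))) (C : List Int) (A : Int) :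
    Nat → Int → Int → Int → List Bool → Int → Option (List Bool × Int)
  | 0, _, _, _, _, _ => none
  | f + 1, k, total, ele, vis, mw =>
    if k = A then some (vis, max mw total)
    else
      (gr.getD ele []).foldl (pvStepA C A k total ele (pvDfsA gr C A f))
        (some (PySem.List.pySetD vis ele true, mw))

def solve (A : Int) (B : List Int) (C : List Int) : Int :=
  let gr := pvBuildA B C
  let vis := List.replicate (B.length + 1) false
  match pvDfsA gr C A (B.length + 2) 0 0 1 vis (-2147483648) with
  | some s => s.2
  | none => 0    -- never reached under Pre_solve (proved below)

-- ===== PORT B =====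

inductive PvFrame where
  | enter (k total ele : Int)                                  -- (True, k, total, ele, None)
  | visit (k total ele : Int) (pending : List (Int × Int))     -- (False, k, total, ele, pending)
deriving Repr, DecidableEq

-- graph.setdefault(B[i], []).append(v) is exactly Dict.modify with default [] (d[k] = d.get(k,[]) + [v])
def pvBuildB (B C : List Int) : PySem.Dict Int (List (Int × Int)) :=
  (PySem.List.pyRange 1 (B.length : Int) 1).foldl
    (fun g i =>
      let bi := PySem.List.pyGetD B i 0
      let g := g.modify bi [] (fun l => l ++ [((i + 1 : Int), PySem.List.pyGetD C i 0)])
      g.modify (i + 1) [] (fun l => l ++ [(bi, PySem.List.pyGetD C (bi - 1) 0)]))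
    PySem.Dict.empty

-- the `while stack:` loop; list head = top of the Python stack; fuel-guarded
-- ((n+1)*(4n+2)+2 iterations are proved sufficient below)
def pvRunB (gr : PySem.Dict Int (List (Int × Int))) (C : List Int) (A : Int) :
    Nat → List PvFrame → List Bool → Int → Option (List Bool × Int)
  | 0, _, _, _ => none
  | _ + 1, [], vis, mw => some (vis, mw)
  | f + 1, PvFrame.enter k t e :: rest, vis, mw =>
    if k = A then pvRunB gr C A f rest vis (max mw t)
    else pvRunB gr C A f (PvFrame.visit k t e (gr.getD e []) :: rest)
           (PySem.List.pySetD vis e true) mw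
  | f + 1, PvFrame.visit _ _ _ [] :: rest, vis, mw => pvRunB gr C A f rest vis mw
  | f + 1, PvFrame.visit k t e ((ne, nw) :: pend) :: rest, vis, mw =>
    let w := |nw - PySem.List.pyGetD C (e - 1) 0|
    let nwt := PySem.Int.mod (t + PySem.Int.mod (w * (A - k)) 1000000007) 1000000007
    let mw2 := max mw nwt
    if PySem.List.pyGetD vis ne false = false then
      pvRunB gr C A f
        (PvFrame.enter (k + 1) (PySem.Int.mod (t + w) 1000000007) ne :: PvFrame.visit k t e pend :: rest)
        vis mw2
    else pvRunB gr C A f (PvFrame.visit k t e pend :: rest) vis mw2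

def solve_alt (A : Int) (B : List Int) (C : List Int) : Int :=
  let gr := pvBuildB B C
  let n := B.length
  let vis := List.replicate (n + 1) false
  match pvRunB gr C A ((n + 1) * (4 * n + 2) + 2) [PvFrame.enter 0 0 1] vis (-2147483648) with
  | some s => s.2
  | none => 0    -- never reached under Pre_solve (proved below)

-- ===== PRECONDITION & SPEC =====
-- Pre_ restricts to well-formed inputs (a node-label array B indexing into a long-enough C):
-- outside it A either raises IndexError, or its value hinges on negative-index wraparound /
-- out-of-range node labels that happen to stay unreached — accidents of A's implementation.
def Pre_solve (A : Int) (B : List Int) (C : List Int) : Prop :=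
  (B.length = 0 → A = 0) ∧ B.length ≤ C.length ∧
  ∀ i : Nat, i < B.length → 1 ≤ i →
    1 - (B.length : Int) ≤ B.getD i 0 ∧ B.getD i 0 ≤ (B.length : Int)
instance (A : Int) (B : List Int) (C : List Int) : Decidable (Pre_solve A B C) := by
  unfold Pre_solve; infer_instance

def pvWitness_solve : Int × List Int × List Int := (2, [1, 1, 2], [5, 3, 4])

def Spec_solve (A : Int) (B : List Int) (C : List Int) (out : Int) : Prop := out = solve_alt A B C
instance (A : Int) (B : List Int) (C : List Int) (out : Int) : Decidable (Spec_solve A B C out) := by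
  unfold Spec_solve; infer_instance

-- ===== CLAIM (what is proved, stated in full; the proofs are below) =====
def Claim_equal_solve : Prop := ∀ (A : Int) (B : List Int) (C : List Int),
  Dom_solve A B C → Pre_solve A B C → Spec_solve A B C (solve A B C)

-- ===== LEMMAS AND PROOFS =====


-- index resolution: the Int index, its Nat slot, and the Python read/write on it

theorem pvIdx_lt (n : Nat) (i : Int) (j : Nat) (h : PySem.List.pyIdx? n i = some j) : j < n := by
  unfold PySem.List.pyIdx? at h
  split_ifs at h <;> simp_all <;> omega

theorem pvIdx_of_inRange (n : Nat) (i : Int) (h : PySem.Raise.InRange n i) :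
    ∃ j : Nat, PySem.List.pyIdx? n i = some j := by
  obtain ⟨h1, h2⟩ := h
  unfold PySem.List.pyIdx?
  split_ifs <;> simp_all

theorem pvGetD_idx {α : Type} (xs : List α) (i : Int) (d : α) (j : Nat)
    (h : PySem.List.pyIdx? xs.length i = some j) :
    PySem.List.pyGetD xs i d = xs.getD j d := by
  have hj := pvIdx_lt _ _ _ h
  simp [PySem.List.pyGetD, PySem.List.pyGet?, h, List.getD, List.getElem?_eq_getElem hj]

theorem pvSetD_idx {α : Type} (xs : List α) (i : Int) (v : α) (j : Nat)
    (h : PySem.List.pyIdx? xs.length i = some j) :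
    PySem.List.pySetD xs i v = xs.set j v := by
  simp [PySem.List.pySetD, PySem.List.pySet?, h]

theorem pvSetD_out {α : Type} (xs : List α) (i : Int) (v : α)
    (h : PySem.List.pyIdx? xs.length i = none) :
    PySem.List.pySetD xs i v = xs := by
  simp [PySem.List.pySetD, PySem.List.pySet?, h]

theorem pvCount_setD_le (vis : List Bool) (e : Int) :
    (PySem.List.pySetD vis e true).count false ≤ vis.count false := by
  cases h : PySem.List.pyIdx? vis.length e with
  | none => rw [pvSetD_out _ _ _ h]
  | some j =>
    rw [pvSetD_idx _ _ _ _ h]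
    rw [List.count_set (pvIdx_lt _ _ _ h)]
    split_ifs <;> simp_all

theorem pvCount_setD_lt (vis : List Bool) (e : Int)
    (h : PySem.Raise.InRange vis.length e)
    (hf : PySem.List.pyGetD vis e false = false) :
    (PySem.List.pySetD vis e true).count false + 1 = vis.count false := by
  obtain ⟨j, hj⟩ := pvIdx_of_inRange _ _ h
  have hlt := pvIdx_lt _ _ _ hj
  rw [pvGetD_idx _ _ _ _ hj, List.getD, List.getElem?_eq_getElem hlt] at hf
  simp at hf
  rw [pvSetD_idx _ _ _ _ hj, List.count_set hlt]
  simp [hf]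
  have : 1 ≤ vis.count false := by
    have := List.count_pos_iff.mpr (show false ∈ vis by
      rw [← hf]; exact List.getElem_mem hlt)
    omega
  omega

theorem pvFoldA_none (C : List Int) (A k t e : Int)
    (rec : Int → Int → Int → List Bool → Int → Option (List Bool × Int)) (l : List (Int × Int)) :
    l.foldl (pvStepA C A k t e rec) none = none := by
  induction l with
  | nil => rfl
  | cons p rest ih => simpa [pvStepA] using ih


-- visited flags only ever get set: the run of a call keeps vis.length and never increases
-- the number of false flags

theorem pvDecMain (gr : PySem.Dict Int (List (Int × Int))) (C : List Int) (A : Int) : ∀ f : Nat,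
    (∀ (k t e : Int) (vis : List Bool) (mw : Int) (out : List Bool × Int),
      pvDfsA gr C A f k t e vis mw = some out →
      out.1.length = vis.length ∧ out.1.count false ≤ vis.count false)
    ∧ (∀ (l : List (Int × Int)) (k t e : Int) (vis : List Bool) (mw : Int) (out : List Bool × Int),
      l.foldl (pvStepA C A k t e (pvDfsA gr C A f)) (some (vis, mw)) = some out →
      out.1.length = vis.length ∧ out.1.count false ≤ vis.count false) := by
  intro f
  induction f with
  | zero =>
    constructor
    · intro k t e vis mw out h; simp [pvDfsA] at h
    · intro l
      induction l with
      | nil => intro k t e vis mw out h; simp at h; simp [← h]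
      | cons p rest ih =>
        intro k t e vis mw out h
        rw [List.foldl_cons] at h
        by_cases hg : PySem.List.pyGetD vis p.1 false = false
        · simp [pvStepA, hg, pvDfsA, pvFoldA_none] at h
        · simp [pvStepA, hg] at h
          exact ih k t e vis (max mw _) out h
  | succ f ih =>
    have hD : ∀ (k t e : Int) (vis : List Bool) (mw : Int) (out : List Bool × Int),
        pvDfsA gr C A (f + 1) k t e vis mw = some out →
        out.1.length = vis.length ∧ out.1.count false ≤ vis.count false := by
      intro k t e vis mw out h
      rw [pvDfsA] at h
      by_cases hk : k = A
      · simp [hk] at h; simp [← h]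
      · simp [hk] at h
        obtain ⟨h1, h2⟩ := ih.2 _ _ _ _ _ _ _ h
        rw [PySem.List.length_pySetD] at h1
        exact ⟨h1, le_trans h2 (pvCount_setD_le vis e)⟩
    refine ⟨hD, ?_⟩
    intro l
    induction l with
    | nil => intro k t e vis mw out h; simp at h; simp [← h]
    | cons p rest ihl =>
      intro k t e vis mw out h
      rw [List.foldl_cons] at h
      by_cases hg : PySem.List.pyGetD vis p.1 false = false
      · simp only [pvStepA, Option.bind_some, hg, if_true] at h
        cases hc : pvDfsA gr C A (f + 1) (k + 1)
            (PySem.Int.mod (t + |p.2 - PySem.List.pyGetD C (e - 1) 0|) 1000000007) p.1 vis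
            (max mw (PySem.Int.mod (t + PySem.Int.mod (|p.2 - PySem.List.pyGetD C (e - 1) 0| * (A - k)) 1000000007) 1000000007)) with
        | none => rw [hc, pvFoldA_none] at h; exact absurd h (by simp)
        | some st =>
          rw [hc] at h
          obtain ⟨c1, c2⟩ := hD _ _ _ _ _ _ hc
          obtain ⟨r1, r2⟩ := ihl k t e st.1 st.2 out (by simpa using h)
          exact ⟨r1.trans c1, r2.trans c2⟩
      · simp only [pvStepA, Option.bind_some, hg] at h
        exact ihl k t e vis _ out h

-- the graph the build produces: every neighbor label is a valid visited-slot, and every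
-- adjacency list is short

def pvGoodG (gr : PySem.Dict Int (List (Int × Int))) (len : Nat) : Prop :=
  ∀ (e : Int) (p : Int × Int), p ∈ gr.getD e [] → PySem.Raise.InRange len p.1

def pvBoundG (gr : PySem.Dict Int (List (Int × Int))) (L : Nat) : Prop :=
  ∀ e : Int, (gr.getD e []).length ≤ L

theorem pvBuild_good (B C : List Int)
    (hB : ∀ j : Nat, j < B.length → 1 ≤ j →
      1 - (B.length : Int) ≤ B.getD j 0 ∧ B.getD j 0 ≤ (B.length : Int)) :
    pvGoodG (pvBuildA B C) (B.length + 1) ∧ pvBoundG (pvBuildA B C) (2 * B.length) := by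
  have key : ∀ (l : List Int) (g : PySem.Dict Int (List (Int × Int))) (m : Nat),
      (∀ i ∈ l, 1 ≤ i ∧ i < (B.length : Int)) →
      pvGoodG g (B.length + 1) → pvBoundG g m →
      pvGoodG (l.foldl (fun g i =>
        let bi := PySem.List.pyGetD B i 0
        let g := g.modify bi [] (fun l => l ++ [((i + 1 : Int), PySem.List.pyGetD C i 0)])
        g.modify (i + 1) [] (fun l => l ++ [(bi, PySem.List.pyGetD C (bi - 1) 0)])) g) (B.length + 1)
      ∧ pvBoundG (l.foldl (fun g i =>
        let bi := PySem.List.pyGetD B i 0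
        let g := g.modify bi [] (fun l => l ++ [((i + 1 : Int), PySem.List.pyGetD C i 0)])
        g.modify (i + 1) [] (fun l => l ++ [(bi, PySem.List.pyGetD C (bi - 1) 0)])) g) (m + 2 * l.length) := by
    intro l
    induction l with
    | nil => intro g m _ hg hb; exact ⟨hg, by simpa using hb⟩
    | cons i rest ih =>
      intro g m hmem hg hb
      obtain ⟨hi1, hi2⟩ := hmem i (List.mem_cons_self)
      have hbi : PySem.List.pyGetD B i 0 = B.getD i.toNat 0 := by
        rw [pvGetD_idx B i 0 i.toNat]
        unfold PySem.List.pyIdx?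
        rw [if_pos (by omega), if_pos (by omega)]
      have hiN : i.toNat < B.length ∧ 1 ≤ i.toNat := by omega
      have hbir : PySem.Raise.InRange (B.length + 1) (PySem.List.pyGetD B i 0) := by
        rw [hbi]
        obtain ⟨hlo, hhi⟩ := hB i.toNat hiN.1 hiN.2
        constructor <;> push_cast <;> omega
      have hi1r : PySem.Raise.InRange (B.length + 1) (i + 1) := by
        constructor <;> push_cast <;> omega
      rw [List.foldl_cons]
      have hgood : pvGoodG ((g.modify (PySem.List.pyGetD B i 0) []
            (fun l => l ++ [((i + 1 : Int), PySem.List.pyGetD C i 0)])).modify (i + 1) []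
            (fun l => l ++ [(PySem.List.pyGetD B i 0, PySem.List.pyGetD C (PySem.List.pyGetD B i 0 - 1) 0)]))
          (B.length + 1) := by
        intro e p hp
        by_cases he2 : e = i + 1
        · subst he2
          rw [PySem.Dict.getD_modify_self] at hp
          rcases List.mem_append.mp hp with hp | hp
          · by_cases he1 : (i + 1 : Int) = PySem.List.pyGetD B i 0
            · rw [he1, PySem.Dict.getD_modify_self] at hp
              rcases List.mem_append.mp hp with hp | hp
              · exact hg _ _ hp
              · simp at hp; rw [hp]; exact hbir
            · rw [PySem.Dict.getD_modify_of_ne _ _ _ he1] at hp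
              exact hg _ _ hp
          · simp at hp; rw [hp]; exact hbir
        · rw [PySem.Dict.getD_modify_of_ne _ _ _ he2] at hp
          by_cases he1 : e = PySem.List.pyGetD B i 0
          · subst he1
            rw [PySem.Dict.getD_modify_self] at hp
            rcases List.mem_append.mp hp with hp | hp
            · exact hg _ _ hp
            · simp at hp; rw [hp]; exact hi1r
          · rw [PySem.Dict.getD_modify_of_ne _ _ _ he1] at hp
            exact hg _ _ hp
      have hbound : pvBoundG ((g.modify (PySem.List.pyGetD B i 0) []
            (fun l => l ++ [((i + 1 : Int), PySem.List.pyGetD C i 0)])).modify (i + 1) []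
            (fun l => l ++ [(PySem.List.pyGetD B i 0, PySem.List.pyGetD C (PySem.List.pyGetD B i 0 - 1) 0)]))
          (m + 2) := by
        intro e
        by_cases he2 : e = i + 1
        · subst he2
          rw [PySem.Dict.getD_modify_self]
          by_cases he1 : (i + 1 : Int) = PySem.List.pyGetD B i 0
          · rw [he1, PySem.Dict.getD_modify_self]
            simpa using by have := hb (PySem.List.pyGetD B i 0); omega
          · rw [PySem.Dict.getD_modify_of_ne _ _ _ he1]
            simpa using by have := hb (i + 1); omega
        · rw [PySem.Dict.getD_modify_of_ne _ _ _ he2]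
          by_cases he1 : e = PySem.List.pyGetD B i 0
          · subst he1
            rw [PySem.Dict.getD_modify_self]
            simpa using by have := hb (PySem.List.pyGetD B i 0); omega
          · rw [PySem.Dict.getD_modify_of_ne _ _ _ he1]
            have := hb e; omega
      obtain ⟨g1, g2⟩ := ih _ (m + 2) (fun j hj => hmem j (List.mem_cons_of_mem _ hj)) hgood hbound
      refine ⟨by exact g1, fun e => ?_⟩
      have := g2 e
      simp only [List.length_cons] at *
      omega
  have hmem : ∀ i ∈ PySem.List.pyRange 1 (B.length : Int) 1, 1 ≤ i ∧ i < (B.length : Int) := by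
    intro i hi; exact PySem.List.mem_pyRange_one.mp hi
  have hempty : pvGoodG (PySem.Dict.empty : PySem.Dict Int (List (Int × Int))) (B.length + 1) := by
    intro e p hp; rw [PySem.Dict.getD_empty] at hp; simp at hp
  have hbempty : pvBoundG (PySem.Dict.empty : PySem.Dict Int (List (Int × Int))) 0 := by
    intro e; rw [PySem.Dict.getD_empty]; simp
  obtain ⟨h1, h2⟩ := key _ PySem.Dict.empty 0 hmem hempty hbempty
  constructor
  · unfold pvBuildA; exact h1
  · unfold pvBuildA
    intro e
    have := h2 e
    have hlen := PySem.List.length_pyRange_one (a := 1) (b := (B.length : Int))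
    rw [hlen] at this
    omega

-- fuel one more than the number of false flags suffices for A's DFS: every recursive call
-- enters a node whose flag is false and immediately sets it

theorem pvSuffMain (gr : PySem.Dict Int (List (Int × Int))) (C : List Int) (A : Int)
    (len : Nat) (hgood : pvGoodG gr len) : ∀ f : Nat,
    (∀ (k t e : Int) (vis : List Bool) (mw : Int), vis.length = len →
      (k = A ∨ (PySem.Raise.InRange len e ∧ PySem.List.pyGetD vis e false = false)) →
      vis.count false < f →
      ∃ out, pvDfsA gr C A f k t e vis mw = some out)
    ∧ (∀ (l : List (Int × Int)) (k t e : Int) (vis : List Bool) (mw : Int), vis.length = len →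
      (∀ p ∈ l, PySem.Raise.InRange len p.1) →
      vis.count false < f →
      ∃ out, l.foldl (pvStepA C A k t e (pvDfsA gr C A f)) (some (vis, mw)) = some out) := by
  intro f
  induction f with
  | zero => exact ⟨fun _ _ _ _ _ _ _ h => absurd h (by omega),
      fun _ _ _ _ _ _ _ _ h => absurd h (by omega)⟩
  | succ f ih =>
    have hD : ∀ (k t e : Int) (vis : List Bool) (mw : Int), vis.length = len →
        (k = A ∨ (PySem.Raise.InRange len e ∧ PySem.List.pyGetD vis e false = false)) →
        vis.count false < f + 1 →
        ∃ out, pvDfsA gr C A (f + 1) k t e vis mw = some out := by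
      intro k t e vis mw hlen hok hcf
      rw [pvDfsA]
      by_cases hk : k = A
      · exact ⟨_, by rw [if_pos hk]⟩
      · rw [if_neg hk]
        rcases hok with hok | ⟨hir, hflag⟩
        · exact absurd hok hk
        · have hdec := pvCount_setD_lt vis e (by rwa [hlen]) hflag
          apply ih.2
          · rw [PySem.List.length_pySetD, hlen]
          · intro p hp; exact hgood e p hp
          · omega
    refine ⟨hD, ?_⟩
    intro l
    induction l with
    | nil => intro k t e vis mw _ _ _; exact ⟨(vis, mw), by simp⟩
    | cons p rest ihl =>
      intro k t e vis mw hlen hpl hcf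
      rw [List.foldl_cons]
      by_cases hg : PySem.List.pyGetD vis p.1 false = false
      · simp only [pvStepA, Option.bind_some, hg, if_true]
        obtain ⟨st, hst⟩ := hD (k + 1) _ p.1 vis _ hlen
          (Or.inr ⟨hpl p List.mem_cons_self, hg⟩) hcf
        rw [hst]
        obtain ⟨h1, h2⟩ := (pvDecMain gr C A (f + 1)).1 _ _ _ _ _ _ hst
        exact ihl k t e st.1 st.2 (h1.trans hlen)
          (fun q hq => hpl q (List.mem_cons_of_mem _ hq)) (by omega)
      · simp only [pvStepA, Option.bind_some, hg]
        exact ihl k t e vis _ hlen (fun q hq => hpl q (List.mem_cons_of_mem _ hq)) hcf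

-- more fuel never changes a completed run of the stack machine

theorem pvMonoB (gr : PySem.Dict Int (List (Int × Int))) (C : List Int) (A : Int) :
    ∀ (f f' : Nat), f ≤ f' →
    ∀ (st : List PvFrame) (vis : List Bool) (mw : Int) (r : List Bool × Int),
      pvRunB gr C A f st vis mw = some r → pvRunB gr C A f' st vis mw = some r := by
  intro f
  induction f with
  | zero => intro f' _ st vis mw r h; simp [pvRunB] at h
  | succ f ih =>
    intro f' hle st vis mw r h
    obtain ⟨f'', rfl⟩ : ∃ f'', f' = f'' + 1 := ⟨f' - 1, by omega⟩
    have hle' : f ≤ f'' := by omega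
    match st with
    | [] => rw [pvRunB] at h ⊢; exact h
    | PvFrame.enter k t e :: rest =>
      rw [pvRunB] at h ⊢
      by_cases hk : k = A
      · rw [if_pos hk] at h ⊢; exact ih _ hle' _ _ _ _ h
      · rw [if_neg hk] at h ⊢; exact ih _ hle' _ _ _ _ h
    | PvFrame.visit k t e [] :: rest =>
      rw [pvRunB] at h ⊢; exact ih _ hle' _ _ _ _ h
    | PvFrame.visit k t e ((ne, nw) :: pend) :: rest =>
      rw [pvRunB] at h ⊢
      by_cases hg : PySem.List.pyGetD vis ne false = false
      · rw [if_pos hg] at h ⊢; exact ih _ hle' _ _ _ _ h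
      · rw [if_neg hg] at h ⊢; exact ih _ hle' _ _ _ _ h

-- simulation: a completed DFS call behaves, on top of any stack, exactly like pushing an
-- enter frame; a partially run neighbor loop like its visit frame

theorem pvSimMain (gr : PySem.Dict Int (List (Int × Int))) (C : List Int) (A : Int) : ∀ f : Nat,
    (∀ (k t e : Int) (vis : List Bool) (mw : Int) (out : List Bool × Int),
      pvDfsA gr C A f k t e vis mw = some out →
      ∀ (rest : List PvFrame) (fb : Nat) (r : List Bool × Int),
        pvRunB gr C A fb rest out.1 out.2 = some r →
        ∃ h, pvRunB gr C A h (PvFrame.enter k t e :: rest) vis mw = some r)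
    ∧ (∀ (l : List (Int × Int)) (k t e : Int) (vis : List Bool) (mw : Int) (out : List Bool × Int),
      l.foldl (pvStepA C A k t e (pvDfsA gr C A f)) (some (vis, mw)) = some out →
      ∀ (rest : List PvFrame) (fb : Nat) (r : List Bool × Int),
        pvRunB gr C A fb rest out.1 out.2 = some r →
        ∃ h, pvRunB gr C A h (PvFrame.visit k t e l :: rest) vis mw = some r) := by
  intro f
  induction f with
  | zero =>
    constructor
    · intro k t e vis mw out h; simp [pvDfsA] at h
    · intro l
      induction l with
      | nil =>
        intro k t e vis mw out h rest fb r hr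
        simp at h
        exact ⟨fb + 1, by rw [pvRunB]; rw [← h] at hr; exact pvMonoB gr C A fb fb (le_refl _) _ _ _ _ hr⟩
      | cons p rest0 ih =>
        intro k t e vis mw out h rest fb r hr
        rw [List.foldl_cons] at h
        by_cases hg : PySem.List.pyGetD vis p.1 false = false
        · simp [pvStepA, hg, pvDfsA, pvFoldA_none] at h
        · simp only [pvStepA, Option.bind_some, hg] at h
          obtain ⟨hh, hhr⟩ := ih k t e vis _ out h rest fb r hr
          exact ⟨hh + 1, by
            obtain ⟨ne, nw⟩ := p
            rw [pvRunB]
            simp only at hg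
            rw [if_neg hg]
            exact hhr⟩
  | succ f ih =>
    have hD : ∀ (k t e : Int) (vis : List Bool) (mw : Int) (out : List Bool × Int),
        pvDfsA gr C A (f + 1) k t e vis mw = some out →
        ∀ (rest : List PvFrame) (fb : Nat) (r : List Bool × Int),
          pvRunB gr C A fb rest out.1 out.2 = some r →
          ∃ h, pvRunB gr C A h (PvFrame.enter k t e :: rest) vis mw = some r := by
      intro k t e vis mw out h rest fb r hr
      rw [pvDfsA] at h
      by_cases hk : k = A
      · rw [if_pos hk] at h
        refine ⟨fb + 1, ?_⟩
        rw [pvRunB, if_pos hk]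
        obtain rfl : (vis, max mw t) = out := by simpa using h
        exact hr
      · rw [if_neg hk] at h
        obtain ⟨hh, hhr⟩ := ih.2 _ _ _ _ _ _ _ h rest fb r hr
        exact ⟨hh + 1, by rw [pvRunB, if_neg hk]; exact hhr⟩
    refine ⟨hD, ?_⟩
    intro l
    induction l with
    | nil =>
      intro k t e vis mw out h rest fb r hr
      simp at h
      exact ⟨fb + 1, by rw [pvRunB]; rw [← h] at hr; exact hr⟩
    | cons p rest0 ihl =>
      intro k t e vis mw out h rest fb r hr
      obtain ⟨ne, nw⟩ := p
      rw [List.foldl_cons] at h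
      by_cases hg : PySem.List.pyGetD vis ne false = false
      · simp only [pvStepA, Option.bind_some, hg, if_true] at h
        cases hc : pvDfsA gr C A (f + 1) (k + 1)
            (PySem.Int.mod (t + |nw - PySem.List.pyGetD C (e - 1) 0|) 1000000007) ne vis
            (max mw (PySem.Int.mod (t + PySem.Int.mod (|nw - PySem.List.pyGetD C (e - 1) 0| * (A - k)) 1000000007) 1000000007)) with
        | none => rw [hc, pvFoldA_none] at h; exact absurd h (by simp)
        | some st =>
          rw [hc] at h
          obtain ⟨h1, hr1⟩ := ihl k t e st.1 st.2 out (by simpa using h) rest fb r hr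
          obtain ⟨h2, hr2⟩ := hD _ _ _ _ _ _ hc (PvFrame.visit k t e rest0 :: rest) h1 r hr1
          exact ⟨h2 + 1, by rw [pvRunB]; rw [if_pos hg]; exact hr2⟩
      · simp only [pvStepA, Option.bind_some, hg] at h
        obtain ⟨hh, hhr⟩ := ihl k t e vis _ out h rest fb r hr
        exact ⟨hh + 1, by rw [pvRunB]; rw [if_neg hg]; exact hhr⟩

-- fuel sufficiency for the stack machine, by a potential argument: every step strictly
-- decreases  count-false * (2L+2) + Σ frame-weights  (enter weighs 1, a visit frame 2·pending+1)

def pvPhiF : PvFrame → Nat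
  | PvFrame.enter _ _ _ => 1
  | PvFrame.visit _ _ _ p => 2 * p.length + 1

def pvPhiS (st : List PvFrame) : Nat := (st.map pvPhiF).sum

def pvGoodTail (len : Nat) (st : List PvFrame) : Prop :=
  ∀ fr ∈ st, (∀ k t e, fr ≠ PvFrame.enter k t e) ∧
    (∀ (k t e : Int) (p : List (Int × Int)),
      fr = PvFrame.visit k t e p → ∀ q ∈ p, PySem.Raise.InRange len q.1)

def pvGoodStack (len : Nat) (vis : List Bool) : List PvFrame → Prop
  | [] => True
  | PvFrame.enter _ _ e :: rest =>
      (PySem.Raise.InRange len e ∧ PySem.List.pyGetD vis e false = false) ∧ pvGoodTail len rest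
  | PvFrame.visit _ _ _ p :: rest =>
      (∀ q ∈ p, PySem.Raise.InRange len q.1) ∧ pvGoodTail len rest

theorem pvGoodStack_of_tail (len : Nat) (vis : List Bool) (st : List PvFrame)
    (h : pvGoodTail len st) : pvGoodStack len vis st := by
  match st with
  | [] => trivial
  | PvFrame.enter k t e :: rest =>
    exact absurd rfl ((h _ List.mem_cons_self).1 k t e)
  | PvFrame.visit k t e p :: rest =>
    exact ⟨(h _ List.mem_cons_self).2 k t e p rfl,
      fun fr hfr => h fr (List.mem_cons_of_mem _ hfr)⟩

theorem pvSuffB (gr : PySem.Dict Int (List (Int × Int))) (C : List Int) (A : Int)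
    (len L : Nat) (hgood : pvGoodG gr len) (hbound : pvBoundG gr L) : ∀ (f : Nat)
    (st : List PvFrame) (vis : List Bool) (mw : Int), vis.length = len →
    pvGoodStack len vis st →
    vis.count false * (2 * L + 2) + pvPhiS st < f →
    ∃ out, pvRunB gr C A f st vis mw = some out := by
  intro f
  induction f with
  | zero => intro st vis mw _ _ hphi; exact absurd hphi (by omega)
  | succ f ih =>
    intro st vis mw hlen hst hphi
    match st with
    | [] => exact ⟨(vis, mw), by rw [pvRunB]⟩
    | PvFrame.enter k t e :: rest =>
      rw [pvRunB]
      by_cases hk : k = A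
      · rw [if_pos hk]
        apply ih rest vis _ hlen (pvGoodStack_of_tail _ _ _ hst.2)
        simp only [pvPhiS, List.map_cons, List.sum_cons, pvPhiF] at hphi ⊢
        omega
      · rw [if_neg hk]
        obtain ⟨⟨hir, hflag⟩, htail⟩ := hst
        have hdec := pvCount_setD_lt vis e (by rwa [hlen]) hflag
        have hlen' : (PySem.List.pySetD vis e true).length = len := by
          rw [PySem.List.length_pySetD, hlen]
        apply ih _ _ _ hlen'
        · exact ⟨fun q hq => hgood e q hq, htail⟩
        · have hL := hbound e
          simp only [pvPhiS, List.map_cons, List.sum_cons, pvPhiF] at hphi ⊢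
          rw [← hdec] at hphi
          set W := 2 * L + 2 with hW
          have hexp : ((PySem.List.pySetD vis e true).count false + 1) * W
              = (PySem.List.pySetD vis e true).count false * W + W := by ring
          omega
    | PvFrame.visit k t e [] :: rest =>
      rw [pvRunB]
      apply ih rest vis _ hlen (pvGoodStack_of_tail _ _ _ hst.2)
      simp only [pvPhiS, List.map_cons, List.sum_cons, pvPhiF] at hphi ⊢
      omega
    | PvFrame.visit k t e ((ne, nw) :: pend) :: rest =>
      rw [pvRunB]
      obtain ⟨hpend, htail⟩ := hst
      by_cases hg : PySem.List.pyGetD vis ne false = false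
      · rw [if_pos hg]
        apply ih _ _ _ hlen
        · refine ⟨⟨hpend _ List.mem_cons_self, hg⟩, ?_⟩
          intro fr hfr
          rcases List.mem_cons.mp hfr with rfl | hfr
          · constructor
            · intro k' t' e' h; cases h
            · intro k' t' e' p' hp'
              obtain ⟨rfl, rfl, rfl, rfl⟩ := PvFrame.visit.inj hp'
              exact fun q hq => hpend q (List.mem_cons_of_mem _ hq)
          · exact htail fr hfr
        · simp only [pvPhiS, List.map_cons, List.sum_cons, pvPhiF, List.length_cons] at hphi ⊢
          omega
      · rw [if_neg hg]
        apply ih _ _ _ hlen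
        · exact ⟨fun q hq => hpend q (List.mem_cons_of_mem _ hq), htail⟩
        · simp only [pvPhiS, List.map_cons, List.sum_cons, pvPhiF, List.length_cons] at hphi ⊢
          omega

-- ===== VERDICT (by name: the statement is the Claim_ definition above) =====
theorem pvRunB_nil (gr : PySem.Dict Int (List (Int × Int))) (C : List Int) (A : Int)
    (out : List Bool × Int) : pvRunB gr C A 1 [] out.1 out.2 = some out := by
  rw [pvRunB]

theorem solve_spec : Claim_equal_solve := by
  intro A B C _ hpre
  unfold Spec_solve
  obtain ⟨h0, hlenC, hB⟩ := hpre
  by_cases hn : B.length = 0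
  · -- empty B: Pre_ forces A = 0, both sides return max(-2^31, 0) = 0 at once
    have hA := h0 hn
    subst hA
    have hBnil : B = [] := List.length_eq_zero_iff.mp hn
    subst hBnil
    simp [solve, solve_alt, pvDfsA, pvRunB]
  · have hn1 : 1 ≤ B.length := Nat.pos_of_ne_zero hn
    obtain ⟨hgood, hbound⟩ := pvBuild_good B C hB
    have hlen0 : (List.replicate (B.length + 1) false).length = B.length + 1 := by simp
    have hcf0 : (List.replicate (B.length + 1) false).count false = B.length + 1 := by
      simp
    have hidx1 : PySem.List.pyIdx? (B.length + 1) 1 = some 1 := by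
      unfold PySem.List.pyIdx?
      rw [if_pos (by omega), if_pos (by push_cast; omega)]
      rfl
    have hflag1 : PySem.List.pyGetD (List.replicate (B.length + 1) false) 1 false = false := by
      rw [pvGetD_idx _ _ _ 1 (by rw [hlen0]; exact hidx1)]
      simp
    have hir1 : PySem.Raise.InRange (B.length + 1) 1 := by
      constructor <;> push_cast <;> omega
    obtain ⟨outA, houtA⟩ := (pvSuffMain (pvBuildA B C) C A (B.length + 1) hgood (B.length + 2)).1
      0 0 1 (List.replicate (B.length + 1) false) (-2147483648) hlen0
      (Or.inr ⟨hir1, hflag1⟩) (by omega)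
    obtain ⟨outB, houtB⟩ := pvSuffB (pvBuildA B C) C A (B.length + 1) (2 * B.length) hgood hbound
      ((B.length + 1) * (4 * B.length + 2) + 2) [PvFrame.enter 0 0 1]
      (List.replicate (B.length + 1) false) (-2147483648) hlen0
      ⟨⟨hir1, hflag1⟩, by intro fr hfr; simp at hfr⟩
      (by
        simp only [pvPhiS, pvPhiF, List.map_cons, List.map_nil, List.sum_cons, List.sum_nil]
        rw [hcf0]
        have h42 : 2 * (2 * B.length) + 2 = 4 * B.length + 2 := by ring
        rw [h42]
        omega)
    obtain ⟨h, hh⟩ := (pvSimMain (pvBuildA B C) C A (B.length + 2)).1 _ _ _ _ _ _ houtA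
      [] 1 outA (pvRunB_nil _ _ _ _)
    have hBA : outB = outA := by
      rcases le_total h ((B.length + 1) * (4 * B.length + 2) + 2) with hle | hle
      · have h2 := pvMonoB (pvBuildA B C) C A h _ hle _ _ _ _ hh
        rw [houtB] at h2
        exact Option.some.inj h2
      · have h2 := pvMonoB (pvBuildA B C) C A _ h hle _ _ _ _ houtB
        rw [hh] at h2
        exact (Option.some.inj h2).symm
    have hbb : pvBuildB B C = pvBuildA B C := rfl
    simp only [solve, solve_alt, hbb]
    rw [houtA, houtB, hBA]
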